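-- pv_equiv track=rewrite | github.com/hash066/ey-bcm-project-full-repo | ey-catalyst/gap-assessment/backend/app/routes/controls.py | filter_controls
-- ===== SOURCE A (Python) =====
-- from typing import Dict, List, Optional, Any
--
-- def filter_controls(
--     results: List[Dict[str, Any]],
--     framework: Optional[str] = None,
--     domain: Optional[str] = None,
--     priority: Optional[str] = None
-- ) -> List[Dict[str, Any]]:
--     """
--     Filter controls based on query parameters.
--
--     Args:
--         results: List of gap analysis results
--         framework: Framework filter
--         domain: Domain filter
--         priority: Priority filter
--
--     Returns:
--         Filtered list of controls
--     """
--     filtered_results = results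
--
--     if framework:
--         filtered_results = [r for r in filtered_results if r.get('framework') == framework]
--
--     if domain:
--         filtered_results = [r for r in filtered_results if r.get('domain') == domain]
--
--     if priority:
--         filtered_results = [r for r in filtered_results if r.get('priority') == priority]
--
--     return filtered_results
-- ===== SOURCE B (Python) =====
-- def filter_controls(results, framework=None, domain=None, priority=None):
--     """Single-pass filter: test all three predicates at once."""
--     if not (framework or domain or priority):
--         return results
--     return [
--         r for r in results
--         if (not framework or r.get('framework') == framework)
--         and (not domain or r.get('domain') == domain)
--         and (not priority or r.get('priority') == priority)
--     ]
-- ===== Notes on version B (the rewrite author's own statement) =====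
-- stated objective: simpler
-- what changed: Replaces A's three conditional sequential filter passes (each building an intermediate list) with one traversal that tests all three predicates at once, returning the input list untouched when no filter is active.
import Mathlib
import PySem

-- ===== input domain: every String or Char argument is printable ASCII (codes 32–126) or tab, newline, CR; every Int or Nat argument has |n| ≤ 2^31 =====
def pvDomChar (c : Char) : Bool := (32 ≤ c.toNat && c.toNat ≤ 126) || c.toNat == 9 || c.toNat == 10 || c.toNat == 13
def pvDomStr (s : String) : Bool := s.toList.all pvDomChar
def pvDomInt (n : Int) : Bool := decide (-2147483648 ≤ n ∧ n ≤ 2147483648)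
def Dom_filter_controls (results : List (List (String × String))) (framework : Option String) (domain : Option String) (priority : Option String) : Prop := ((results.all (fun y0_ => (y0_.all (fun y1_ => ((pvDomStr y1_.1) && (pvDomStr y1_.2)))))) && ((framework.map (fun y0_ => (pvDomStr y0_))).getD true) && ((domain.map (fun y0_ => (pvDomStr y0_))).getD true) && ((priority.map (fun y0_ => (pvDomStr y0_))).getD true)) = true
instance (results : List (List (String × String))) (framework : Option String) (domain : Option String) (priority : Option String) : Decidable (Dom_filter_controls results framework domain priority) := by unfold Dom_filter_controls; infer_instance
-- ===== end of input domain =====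

-- B replaces A's three conditional sequential filter passes with one single-pass filter (objective: simpler).


-- ===== PORT A =====
-- dict.get(k): first match in the association list (Python dict lookup)
def pvGet (r : List (String × String)) (k : String) : Option String :=
  (r.find? (fun kv => kv.1 == k)).map (·.2)

-- Python truthiness of an Optional[str]
def pvTruthy : Option String → Bool
  | none => false
  | some s => s != ""

def filter_controls (results : List (List (String × String))) (framework : Option String) (domain : Option String) (priority : Option String) : List (List (String × String)) :=
  let fr := results
  let fr := if pvTruthy framework then fr.filter (fun r => pvGet r "framework" == framework) else fr
  let fr := if pvTruthy domain then fr.filter (fun r => pvGet r "domain" == domain) else fr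
  let fr := if pvTruthy priority then fr.filter (fun r => pvGet r "priority" == priority) else fr
  fr

-- ===== PORT B =====
def filter_controls_alt (results : List (List (String × String))) (framework : Option String) (domain : Option String) (priority : Option String) : List (List (String × String)) :=
  if !(pvTruthy framework || pvTruthy domain || pvTruthy priority) then results
  else
    results.filter (fun r =>
      (!pvTruthy framework || pvGet r "framework" == framework) &&
      (!pvTruthy domain || pvGet r "domain" == domain) &&
      (!pvTruthy priority || pvGet r "priority" == priority))

-- ===== PRECONDITION & SPEC =====
def Spec_filter_controls (results : List (List (String × String))) (framework : Option String) (domain : Option String) (priority : Option String) (out : List (List (String × String))) : Prop := out = filter_controls_alt results framework domain priority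
instance (results : List (List (String × String))) (framework : Option String) (domain : Option String) (priority : Option String) (out : List (List (String × String))) : Decidable (Spec_filter_controls results framework domain priority out) := by unfold Spec_filter_controls; infer_instance

-- ===== CLAIM (what is proved, stated in full; the proofs are below) =====
def Claim_equal_filter_controls : Prop := ∀ (results : List (List (String × String))) (framework : Option String) (domain : Option String) (priority : Option String), Dom_filter_controls results framework domain priority → Spec_filter_controls results framework domain priority (filter_controls results framework domain priority)

-- ===== LEMMAS AND PROOFS =====

-- ===== VERDICT (by name: the statement is the Claim_ definition above) =====
theorem filter_controls_spec : Claim_equal_filter_controls := by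
  intro results framework domain priority _
  unfold Spec_filter_controls filter_controls filter_controls_alt
  cases hf : pvTruthy framework <;> cases hd : pvTruthy domain <;> cases hp : pvTruthy priority <;>
    simp [List.filter_filter, Bool.and_comm, Bool.and_left_comm]
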